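-- pv_equiv track=rewrite | github.com/alihaktangerman/Backtracking | kmultisubsets.py | kmultisubsets
-- ===== SOURCE A (Python) =====
-- def kmultisubsets(s, k):
--     if k == 0:
--         return [[]]
--     if not s:
--         return []
--     # Include the first element (can be included multiple times)
--     with_first = [[s[0]] + m for m in kmultisubsets(s, k-1)]
--     # Exclude the first element entirely
--     without_first = kmultisubsets(s[1:], k)
--     return with_first + without_first
-- ===== SOURCE B (Python) =====
-- def kmultisubsets(s, k):
--     # Bottom-up DP over suffixes: dp[r] = all r-size multisubsets of the current suffix.
--     if k < 0:
--         return []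
--     dp = [[[]]] + [[] for _ in range(k)]
--     for i in range(len(s) - 1, -1, -1):
--         new = [[[]]]
--         for r in range(1, k + 1):
--             new.append([[s[i]] + m for m in new[r - 1]] + dp[r])
--         dp = new
--     return dp[k]
-- ===== Notes on version B (the rewrite author's own statement) =====
-- stated objective: alternative
-- what changed: replaced the exponential include/exclude recursion over (suffix, k) by a bottom-up dynamic-programming table dp[r] over suffixes, computing each (suffix, remaining) subproblem once
import Mathlib
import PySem

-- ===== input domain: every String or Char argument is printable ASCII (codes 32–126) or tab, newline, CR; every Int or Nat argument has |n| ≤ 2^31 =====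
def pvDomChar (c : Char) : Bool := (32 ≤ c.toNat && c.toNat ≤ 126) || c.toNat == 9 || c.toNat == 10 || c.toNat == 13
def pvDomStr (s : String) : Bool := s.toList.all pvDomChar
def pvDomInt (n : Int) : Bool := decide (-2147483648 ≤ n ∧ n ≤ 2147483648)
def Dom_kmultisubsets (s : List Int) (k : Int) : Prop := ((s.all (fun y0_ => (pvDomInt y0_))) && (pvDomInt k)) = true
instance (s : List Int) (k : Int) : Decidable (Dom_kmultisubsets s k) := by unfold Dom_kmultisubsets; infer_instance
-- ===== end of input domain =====

-- B replaces A's exponential include/exclude recursion by a bottom-up DP over suffixes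
-- (alternative algorithm of similar measured cost); on k<0 with non-empty s, A raises
-- RecursionError (excluded by Pre_) while B returns [].

-- ===== PORT A =====
-- A's recursion for k ≥ 0 (k as Nat): if k == 0 → [[]]; if not s → []; else
-- with_first ++ without_first, exactly as the Python.
def kmultisubsetsAux (s : List Int) (k : Nat) : List (List Int) :=
  match k, s with
  | 0, _ => [[]]
  | _ + 1, [] => []
  | k + 1, a :: rest =>
      ((kmultisubsetsAux (a :: rest) k).map (fun m => a :: m)) ++ kmultisubsetsAux rest (k + 1)
termination_by (k, s.length)

def kmultisubsets (s : List Int) (k : Int) : List (List Int) :=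
  if k = 0 then [[]]
  else if s = [] then []
  else kmultisubsetsAux s k.toNat   -- k < 0 with s ≠ [] raises in Python: excluded by Pre_

-- ===== PORT B =====
-- inner loop of Source B: for r in 1..k, new.append(map(prepend a) new[r-1] ++ dp[r]);
-- rowAux walks dp[1..] carrying prev = new[r-1].
def rowAux (a : Int) (prev : List (List Int)) (dpTail : List (List (List Int))) : List (List (List Int)) :=
  match dpTail with
  | [] => []
  | d :: rest =>
      let cur := prev.map (fun m => a :: m) ++ d
      cur :: rowAux a cur rest

def kmultisubsets_alt (s : List Int) (k : Int) : List (List Int) :=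
  if k < 0 then []
  else
    let kn := k.toNat
    let init : List (List (List Int)) := [[]] :: List.replicate kn []
    -- Python's descending index loop over s = foldr over s
    let dp := s.foldr (fun a dp => [[]] :: rowAux a [[]] dp.tail) init
    dp.getD kn []

-- ===== PRECONDITION & SPEC =====
-- Pre_ excludes exactly k < 0 with non-empty s, where A raises RecursionError.
def Pre_kmultisubsets (s : List Int) (k : Int) : Prop := 0 ≤ k ∨ s = []
instance (s : List Int) (k : Int) : Decidable (Pre_kmultisubsets s k) := by unfold Pre_kmultisubsets; infer_instance
def pvWitness_kmultisubsets : List Int × Int := ([1, 2], 2)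

def Spec_kmultisubsets (s : List Int) (k : Int) (out : List (List Int)) : Prop := out = kmultisubsets_alt s k
instance (s : List Int) (k : Int) (out : List (List Int)) : Decidable (Spec_kmultisubsets s k out) := by unfold Spec_kmultisubsets; infer_instance

-- ===== CLAIM (what is proved, stated in full; the proofs are below) =====
def Claim_equal_kmultisubsets : Prop := ∀ (s : List Int) (k : Int), Dom_kmultisubsets s k → Pre_kmultisubsets s k → Spec_kmultisubsets s k (kmultisubsets s k)

-- ===== LEMMAS AND PROOFS =====

theorem aux_zero (s : List Int) : kmultisubsetsAux s 0 = [[]] := by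
  cases s <;> simp [kmultisubsetsAux]

theorem aux_nil (k : Nat) : kmultisubsetsAux [] (k + 1) = [] := by
  simp [kmultisubsetsAux]

theorem aux_cons (a : Int) (rest : List Int) (k : Nat) :
    kmultisubsetsAux (a :: rest) (k + 1) =
      ((kmultisubsetsAux (a :: rest) k).map (fun m => a :: m)) ++ kmultisubsetsAux rest (k + 1) := by
  simp [kmultisubsetsAux]

-- the inner loop produces the next row of aux-values
theorem rowAux_spec (a : Int) (s : List Int) :
    ∀ (m r : Nat),
      rowAux a (kmultisubsetsAux (a :: s) r)
        ((List.range' (r + 1) m).map (kmultisubsetsAux s)) =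
      (List.range' (r + 1) m).map (kmultisubsetsAux (a :: s)) := by
  intro m
  induction m with
  | zero => intro r; simp [rowAux]
  | succ n ih =>
      intro r
      rw [List.range'_succ]
      simp only [List.map_cons, rowAux]
      have hcur : (kmultisubsetsAux (a :: s) r).map (fun m => a :: m) ++ kmultisubsetsAux s (r + 1)
          = kmultisubsetsAux (a :: s) (r + 1) := (aux_cons a s r).symm
      rw [hcur]
      have := ih (r + 1)
      simpa using this

theorem range'_map_aux_nil (n r : Nat) :
    (List.range' (r + 1) n).map (kmultisubsetsAux []) = List.replicate n [] := by
  induction n generalizing r with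
  | zero => simp
  | succ m ih =>
      rw [List.range'_succ]
      simp only [List.map_cons, aux_nil, List.replicate_succ]
      exact congrArg (List.cons []) (ih (r + 1))

theorem foldr_step_spec (kn : Nat) (s : List Int) :
    s.foldr (fun a dp => [[]] :: rowAux a [[]] dp.tail)
        ([[]] :: List.replicate kn ([] : List (List Int))) =
      (List.range (kn + 1)).map (kmultisubsetsAux s) := by
  induction s with
  | nil =>
      simp only [List.foldr_nil]
      rw [List.range_eq_range', List.range'_succ]
      simp only [List.map_cons, aux_zero]
      exact congrArg (List.cons [[]]) (range'_map_aux_nil kn 0).symm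
  | cons a rest ih =>
      simp only [List.foldr_cons, ih]
      rw [List.range_eq_range', List.range'_succ]
      simp only [List.map_cons, List.tail_cons, aux_zero]
      have h0 : ([[]] : List (List Int)) = kmultisubsetsAux (a :: rest) 0 := (aux_zero _).symm
      rw [h0, rowAux_spec a rest kn 0]

theorem alt_eq (s : List Int) (k : Int) (hk : 0 ≤ k) :
    kmultisubsets_alt s k = kmultisubsetsAux s k.toNat := by
  unfold kmultisubsets_alt
  rw [if_neg (by omega)]
  simp only [foldr_step_spec]
  rw [List.getD_eq_getElem?_getD, List.getElem?_map]
  rw [List.getElem?_range (by omega : k.toNat < k.toNat + 1)]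
  rfl

theorem a_eq (s : List Int) (k : Int) (hk : 0 ≤ k) :
    kmultisubsets s k = kmultisubsetsAux s k.toNat := by
  unfold kmultisubsets
  by_cases h0 : k = 0
  · subst h0; simp [aux_zero]
  · rw [if_neg h0]
    by_cases hs : s = []
    · subst hs
      rw [if_pos rfl]
      obtain ⟨m, hm⟩ : ∃ m, k.toNat = m + 1 := ⟨k.toNat - 1, by omega⟩
      rw [hm, aux_nil]
    · rw [if_neg hs]

-- ===== VERDICT (by name: the statement is the Claim_ definition above) =====
theorem kmultisubsets_spec : Claim_equal_kmultisubsets := by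
  intro s k _ hpre
  unfold Spec_kmultisubsets
  by_cases hk : 0 ≤ k
  · rw [a_eq s k hk, alt_eq s k hk]
  · have hk' : k < 0 := by omega
    have hs : s = [] := by
      rcases hpre with h | h
      · omega
      · exact h
    subst hs
    unfold kmultisubsets kmultisubsets_alt
    rw [if_neg (by omega), if_pos rfl, if_pos hk']
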